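-- pv_equiv track=rewrite | github.com/josecastro04/LAII | Introdução ao Python/cruzamentos.py | cruzamentos
-- ===== SOURCE A (Python) =====
-- def cruzamentos(ruas):
--     d = {};
--
--     for r in ruas:
--         if r[0] not in d:
--             d[r[0]] = 1;
--         else:
--             d[r[0]] += 1;
--
--         c = len(r) - 1
--         if r[c] not in d:
--             d[r[c]] = 1;
--         elif r[c] != r[0]:
--             d[r[c]] += 1;
--
--     lista = list(d.items());
--     lista.sort(key = lambda x : (x[1], x[0]))
--
--     return lista;
-- ===== SOURCE B (Python) =====
-- def cruzamentos(ruas):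
--     endpoints = sorted(e for r in ruas for e in {r[0], r[-1]})
--     pares = []
--     for e in endpoints:
--         if pares and pares[-1][0] == e:
--             pares[-1] = (e, pares[-1][1] + 1)
--         else:
--             pares.append((e, 1))
--     pares.sort(key=lambda x: (x[1], x[0]))
--     return pares
-- ===== Notes on version B (the rewrite author's own statement) =====
-- stated objective: alternative
-- what changed: A tallies endpoints into a dict via two conditional update branches per street; B uses no dict at all: it flattens every street to its set of endpoints, sorts the flat list, run-length-encodes adjacent runs into (name, count) pairs, and sorts those pairs.
-- outside the precondition, e.g. on cruzamentos([[]]): A raises IndexError, B raises IndexError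
import Mathlib
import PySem

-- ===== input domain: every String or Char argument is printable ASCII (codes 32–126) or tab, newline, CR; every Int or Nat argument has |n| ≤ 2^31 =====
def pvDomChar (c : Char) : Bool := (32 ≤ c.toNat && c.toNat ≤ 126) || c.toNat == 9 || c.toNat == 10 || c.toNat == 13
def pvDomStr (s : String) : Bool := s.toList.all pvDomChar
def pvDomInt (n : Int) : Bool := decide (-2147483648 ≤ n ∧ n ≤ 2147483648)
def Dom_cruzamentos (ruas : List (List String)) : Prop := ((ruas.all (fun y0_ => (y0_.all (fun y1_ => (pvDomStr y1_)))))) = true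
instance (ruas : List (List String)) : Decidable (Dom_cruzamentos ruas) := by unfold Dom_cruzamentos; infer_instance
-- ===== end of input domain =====

-- B replaces A's dict of counts by a sort-then-scan algorithm: flatten the streets to their
-- deduplicated endpoints, sort that flat list, run-length-encode adjacent runs, sort the pairs.

-- ===== PORT A =====
-- one loop iteration of A: the two conditional endpoint updates on the dict
def cruzStepA (d : PySem.Dict String Int) (r : List String) : PySem.Dict String Int :=
  let a := PySem.List.pyGetD r 0 ""            -- r[0]  (total form; Pre_ guarantees r ≠ [])
  let d1 := if d.contains a then d.modify a 0 (· + 1) else d.insert a 1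
  let c := (r.length : Int) - 1                -- c = len(r) - 1
  let b := PySem.List.pyGetD r c ""            -- r[c]
  if !d1.contains b then d1.insert b 1
  else if b ≠ a then d1.modify b 0 (· + 1)
  else d1

def cruzamentos (ruas : List (List String)) : List (String × Int) :=
  let d := ruas.foldl cruzStepA PySem.Dict.empty
  PySem.List.sorted2 d.items (fun x => x.2) (fun x => x.1)

-- ===== PORT B =====
-- {r[0], r[-1]}: the two-element set a street contributes; its Python iteration order is
-- irrelevant here because B only feeds it into a key-less sorted(); ported as ordered dedup
def cruzEnds (r : List String) : List String :=
  PySem.List.dedup [PySem.List.pyGetD r 0 "", PySem.List.pyGetD r (-1) ""]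

-- one iteration of B's run-length-encoding loop over the sorted endpoint list
def cruzRleStep (ps : List (String × Int)) (e : String) : List (String × Int) :=
  match ps.getLast? with
  | some p => if p.1 == e then ps.dropLast ++ [(e, p.2 + 1)] else ps ++ [(e, 1)]
  | none => ps ++ [(e, 1)]

def cruzamentos_alt (ruas : List (List String)) : List (String × Int) :=
  let endpoints := PySem.List.sorted (ruas.flatMap cruzEnds) (fun x => x)
  let pares := endpoints.foldl cruzRleStep []
  PySem.List.sorted2 pares (fun x => x.2) (fun x => x.1)

-- ===== PRECONDITION & SPEC =====
-- Pre_ excludes inputs containing an empty street, on which Python A raises IndexError at r[0].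
def Pre_cruzamentos (ruas : List (List String)) : Prop := ∀ r ∈ ruas, r.isEmpty = false
instance (ruas : List (List String)) : Decidable (Pre_cruzamentos ruas) := by unfold Pre_cruzamentos; infer_instance

def pvWitness_cruzamentos : List (List String) := [["a", "b"], ["b", "c", "b"], ["d"]]

def Spec_cruzamentos (ruas : List (List String)) (out : List (String × Int)) : Prop := out = cruzamentos_alt ruas
instance (ruas : List (List String)) (out : List (String × Int)) : Decidable (Spec_cruzamentos ruas out) := by unfold Spec_cruzamentos; infer_instance

-- ===== CLAIM (what is proved, stated in full; the proofs are below) =====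
def Claim_equal_cruzamentos : Prop := ∀ (ruas : List (List String)), Dom_cruzamentos ruas → Pre_cruzamentos ruas → Spec_cruzamentos ruas (cruzamentos ruas)

-- ===== LEMMAS AND PROOFS =====

-- the counting-loop increment hidden in A's two conditional branches
def cruzInc (d : PySem.Dict String Int) (e : String) : PySem.Dict String Int :=
  d.insert e (d.getD e 0 + 1)

lemma inc_cases (d : PySem.Dict String Int) (k : String) :
    (if d.contains k then d.modify k 0 (· + 1) else d.insert k 1) = cruzInc d k := by
  by_cases h : d.contains k = true
  · rw [if_pos h]; rfl
  · rw [if_neg h]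
    unfold cruzInc
    rw [PySem.Dict.getD_of_not_contains d 0 (by simpa using h)]
    norm_num

lemma pyGetD_last (r : List String) (h : r ≠ []) :
    PySem.List.pyGetD r ((r.length : Int) - 1) "" = PySem.List.pyGetD r (-1) "" := by
  have h1 : 1 ≤ r.length := List.length_pos_of_ne_nil h
  simp [PySem.List.pyGetD, PySem.List.pyGet?, PySem.List.pyIdx?, h1]

-- A's per-street step is the tally of the street's deduplicated endpoint pair
lemma stepA_eq (d : PySem.Dict String Int) (r : List String) (h : r ≠ []) :
    cruzStepA d r = (cruzEnds r).foldl cruzInc d := by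
  unfold cruzStepA cruzEnds
  dsimp only
  rw [pyGetD_last r h]
  generalize PySem.List.pyGetD r 0 "" = a
  generalize PySem.List.pyGetD r (-1) "" = b
  rw [inc_cases d a]
  by_cases hab : b = a
  · subst hab
    have hded : PySem.List.dedup [b, b] = [b] := by
      simp [PySem.List.dedup_eq_ofList, PySem.Set.ofList_cons, PySem.Set.discard]
    rw [hded]
    have hc : (cruzInc d b).contains b = true := by
      unfold cruzInc; exact PySem.Dict.contains_insert_self _ _ _
    simp [hc]
  · have hded : PySem.List.dedup [a, b] = [a, b] := by
      have : ([a, b] : List String).Nodup := by simp; exact fun e => hab e.symm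
      simp [PySem.List.dedup_eq_ofList, PySem.Set.ofList_eq_self_of_nodup _ this]
    rw [hded]
    show _ = cruzInc (cruzInc d a) b
    rw [← inc_cases (cruzInc d a) b]
    by_cases hc : (cruzInc d a).contains b = true
    · simp [hc, hab]
    · simp [hc]

lemma fold_eq (ruas : List (List String)) (d : PySem.Dict String Int)
    (h : ∀ r ∈ ruas, r ≠ []) :
    ruas.foldl cruzStepA d = (ruas.flatMap cruzEnds).foldl cruzInc d := by
  induction ruas generalizing d with
  | nil => rfl
  | cons r rs ih =>
    rw [List.flatMap_cons, List.foldl_append, List.foldl_cons,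
        stepA_eq d r (h r (List.mem_cons_self)), ih _ (fun x hx => h x (List.mem_cons_of_mem _ hx))]

-- A's whole dict is the Counter of the flat endpoint list
lemma dict_eq_counter (ruas : List (List String)) (h : ∀ r ∈ ruas, r ≠ []) :
    ruas.foldl cruzStepA PySem.Dict.empty = PySem.Dict.counter (ruas.flatMap cruzEnds) := by
  rw [fold_eq ruas PySem.Dict.empty h, ← PySem.Dict.foldl_insert_getD_add_one_eq_counter]
  rfl

-- Set.ofList keeps first occurrences in order, hence is a sublist
lemma ofList_sublist (xs : List String) : (PySem.Set.ofList xs).Sublist xs := by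
  induction xs using List.reverseRecOn with
  | nil => simp [PySem.Set.ofList_nil]
  | append_singleton ys x ih =>
    rw [PySem.Set.ofList_append_singleton]
    by_cases hx : x ∈ PySem.Set.ofList ys
    · rw [PySem.Set.add_of_mem hx]
      exact ih.trans (List.sublist_append_left _ _)
    · rw [PySem.Set.add_of_not_mem hx]
      exact List.Sublist.append ih (List.Sublist.refl _)

-- B's RLE loop over a sorted list produces (key, multiplicity) in dedup order
lemma rle_sorted (xs : List String) (h : xs.Pairwise (· ≤ ·)) :
    xs.foldl cruzRleStep [] = (PySem.Set.ofList xs).map (fun k => (k, (xs.count k : Int))) := by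
  induction xs using List.reverseRecOn with
  | nil => rfl
  | append_singleton ys x ih =>
    have hys : ys.Pairwise (· ≤ ·) := h.sublist (List.sublist_append_left _ _)
    have hle : ∀ y ∈ ys, y ≤ x := by
      have hp := List.pairwise_append.mp h
      exact fun y hy => hp.2.2 y hy x (List.mem_singleton_self x)
    rw [List.foldl_append, List.foldl_cons, List.foldl_nil, ih hys,
        PySem.Set.ofList_append_singleton]
    by_cases hx : x ∈ PySem.Set.ofList ys
    · rw [PySem.Set.add_of_mem hx]
      have hpw : (PySem.Set.ofList ys).Pairwise (· ≤ ·) := hys.sublist (ofList_sublist ys)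
      obtain ⟨ds, hds⟩ : ∃ ds, PySem.Set.ofList ys = ds ++ [x] := by
        rcases List.eq_nil_or_concat (PySem.Set.ofList ys) with hnil | ⟨ds, a, hconc⟩
        · rw [hnil] at hx; simp at hx
        · rw [List.concat_eq_append] at hconc
          refine ⟨ds, ?_⟩
          have ha_ys : a ∈ ys := by
            have : a ∈ PySem.Set.ofList ys := by rw [hconc]; simp
            simpa [PySem.Set.mem_ofList] using this
          have hax_le : a ≤ x := hle a ha_ys
          have hax : a = x := by
            rcases List.mem_append.mp (hconc ▸ hx) with hxds | hxa
            · have hpw2 := hconc ▸ hpw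
              have hxle : x ≤ a :=
                (List.pairwise_append.mp hpw2).2.2 x hxds a (List.mem_singleton_self a)
              exact le_antisymm hax_le hxle
            · exact ((List.mem_singleton.mp hxa).symm)
          rw [hconc, hax]
      have hxnds : x ∉ ds := by
        have hnd := hds ▸ PySem.Set.nodup_ofList ys
        rcases List.nodup_append.mp hnd with ⟨-, -, hdisj⟩
        exact fun hxd => hdisj x hxd x (List.mem_singleton_self x) rfl
      rw [hds, List.map_append, List.map_append]
      unfold cruzRleStep
      simp only [List.map_cons, List.map_nil, List.getLast?_concat]
      simp only [BEq.rfl, if_pos, List.dropLast_concat]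
      have hcx : (ys ++ [x]).count x = ys.count x + 1 := by
        simp [List.count_append]
      have hmap : ds.map (fun k => (k, ((ys ++ [x]).count k : Int)))
          = ds.map (fun k => (k, (ys.count k : Int))) := by
        apply List.map_congr_left
        intro k hk
        have hkx : k ≠ x := fun e => hxnds (e ▸ hk)
        simp [List.count_append, Ne.symm hkx]
      rw [hcx, hmap]
      push_cast
      ring_nf
    · rw [PySem.Set.add_of_not_mem hx]
      have hxys : x ∉ ys := fun hm => hx ((PySem.Set.mem_ofList _ _).mpr hm)
      have hcx : ((ys ++ [x]).count x : Int) = 1 := by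
        have : ys.count x = 0 := List.count_eq_zero.mpr hxys
        simp [List.count_append, this]
      have hmap : (PySem.Set.ofList ys).map (fun k => (k, ((ys ++ [x]).count k : Int)))
          = (PySem.Set.ofList ys).map (fun k => (k, (ys.count k : Int))) := by
        apply List.map_congr_left
        intro k hk
        have hkys : k ∈ ys := (PySem.Set.mem_ofList _ _).mp hk
        have hkx : k ≠ x := fun e => hxys (e ▸ hkys)
        simp [List.count_append, Ne.symm hkx]
      rw [List.map_append, hmap]
      rcases List.eq_nil_or_concat (PySem.Set.ofList ys) with hnil | ⟨ds, a, hconc⟩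
      · rw [hnil]
        unfold cruzRleStep
        simp [List.count_eq_zero.mpr hxys]
      · rw [List.concat_eq_append] at hconc
        have ha_ys : a ∈ ys := by
          have : a ∈ PySem.Set.ofList ys := by rw [hconc]; simp
          simpa [PySem.Set.mem_ofList] using this
        have hax : a ≠ x := fun e => hxys (e ▸ ha_ys)
        rw [hconc, List.map_append]
        unfold cruzRleStep
        simp only [List.map_cons, List.map_nil, List.getLast?_concat]
        rw [if_neg (by simpa using hax)]
        simp [List.count_eq_zero.mpr hxys]

-- sorted2 with keys (x.2, x.1) is sorted with the lexicographic key toLex (x.2, x.1)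
lemma sorted2_eq_sorted_lex (xs : List (String × Int)) :
    PySem.List.sorted2 xs (fun x => x.2) (fun x => x.1)
      = PySem.List.sorted xs (fun x => toLex (x.2, x.1)) := by
  rw [PySem.List.sorted_eq_foldl_insertBy]
  show List.foldl (fun acc x => PySem.List.insertBy
      (fun a b => decide (a.2 < b.2) || (!decide (b.2 < a.2) && decide (a.1 < b.1))) x acc) [] xs
    = _
  have hlt : (fun (a b : String × Int) =>
        decide (a.2 < b.2) || (!decide (b.2 < a.2) && decide (a.1 < b.1)))
      = (fun (a b : String × Int) =>
        decide ((toLex (a.2, a.1) : Lex (Int × String)) < toLex (b.2, b.1))) := by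
    funext a b
    rcases lt_trichotomy a.2 b.2 with h1 | h1 | h1
    · simp [Prod.Lex.lt_iff, h1, lt_asymm h1]
    · simp [Prod.Lex.lt_iff, h1]
    · simp [Prod.Lex.lt_iff, lt_asymm h1, h1.ne', h1]
  rw [hlt]

-- ===== VERDICT (by name: the statement is the Claim_ definition above) =====
theorem cruzamentos_spec : Claim_equal_cruzamentos := by
  intro ruas _ hpre
  unfold Spec_cruzamentos cruzamentos cruzamentos_alt
  dsimp only
  have hpre' : ∀ r ∈ ruas, r ≠ [] := fun r hr => by
    have h0 := hpre r hr; simpa using h0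
  rw [dict_eq_counter ruas hpre', PySem.Dict.items_counter]
  rw [rle_sorted _ (PySem.List.sorted_pairwise (ruas.flatMap cruzEnds) (fun x => x))]
  have hperm : (PySem.List.sorted (ruas.flatMap cruzEnds) (fun x => x)).Perm (ruas.flatMap cruzEnds) :=
    PySem.List.sorted_perm _ _ false
  have hcount : (fun k => (k, ((PySem.List.sorted (ruas.flatMap cruzEnds) (fun x => x)).count k : Int)))
      = (fun k => (k, ((ruas.flatMap cruzEnds).count k : Int))) := by
    funext k; rw [hperm.count_eq]
  rw [hcount]
  have hsets : (PySem.Set.ofList (PySem.List.sorted (ruas.flatMap cruzEnds) (fun x => x))).Perm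
      (PySem.Set.ofList (ruas.flatMap cruzEnds)) := by
    apply List.perm_of_nodup_nodup_toFinset_eq (PySem.Set.nodup_ofList _) (PySem.Set.nodup_ofList _)
    ext a
    simp [List.mem_toFinset, PySem.Set.mem_ofList, hperm.mem_iff]
  rw [sorted2_eq_sorted_lex, sorted2_eq_sorted_lex]
  apply PySem.List.sorted_eq_sorted_of_perm
  · intro p q hpq
    have h2 := congrArg ofLex hpq
    simp only [ofLex_toLex, Prod.mk.injEq] at h2
    exact Prod.ext h2.2 h2.1
  · exact (hsets.map _).symm
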